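-- pv_equiv track=rewrite | github.com/joeytman/Modal_Logic_Tableaux_Solver | modalparser.py | convert_for_aliases
-- ===== SOURCE A (Python) =====
-- def convert_for_aliases(format):
-- 	for ind in range(len(format)):
-- 		if format[ind] == '^':
-- 			return convert_for_aliases(format[:ind] + '&' + format[ind + 1:])
-- 		if ind != len(format) - 1 and format[ind] == '[' and format[ind + 1] == ']':
-- 			return convert_for_aliases(format[:ind] + 'B' + format[ind + 2:])
-- 		if ind != len(format) - 1 and format[ind] == '<' and format[ind + 1] == '>':
-- 			return convert_for_aliases(format[:ind] + 'D' + format[ind + 2:])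
-- 	return format
-- ===== SOURCE B (Python) =====
-- def convert_for_aliases(format):
--     # One left-to-right pass: emit the replacement for each token as it is met.
--     out = []
--     i = 0
--     n = len(format)
--     while i < n:
--         c = format[i]
--         if c == '^':
--             out.append('&')
--             i += 1
--         elif c == '[' and i + 1 < n and format[i + 1] == ']':
--             out.append('B')
--             i += 2
--         elif c == '<' and i + 1 < n and format[i + 1] == '>':
--             out.append('D')
--             i += 2
--         else:
--             out.append(c)
--             i += 1
--     return ''.join(out)
-- ===== Notes on version B (the rewrite author's own statement) =====
-- stated objective: alternative
-- what changed: A rewrites only the first token it finds and then recursively rescans the whole string from the start; B makes a single left-to-right pass, emitting each replacement as the token is met.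
import Mathlib
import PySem

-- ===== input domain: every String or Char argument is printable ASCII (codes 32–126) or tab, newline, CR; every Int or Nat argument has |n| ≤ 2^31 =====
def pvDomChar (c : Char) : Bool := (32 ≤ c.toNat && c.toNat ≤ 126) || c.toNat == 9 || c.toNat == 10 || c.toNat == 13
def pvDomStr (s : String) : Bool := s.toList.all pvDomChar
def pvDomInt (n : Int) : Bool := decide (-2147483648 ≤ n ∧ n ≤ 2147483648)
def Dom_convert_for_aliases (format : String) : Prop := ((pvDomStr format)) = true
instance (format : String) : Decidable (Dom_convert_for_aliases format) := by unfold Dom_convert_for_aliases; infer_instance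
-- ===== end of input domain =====

-- B replaces A's find-one-token-then-rescan-from-the-start recursion by a single
-- left-to-right pass that emits each replacement as the token is met (different algorithm).

-- ===== PORT A =====
-- A's inner 'for ind in range(len(format))' loop: scan indices upward; at the first token
-- found, return the rewritten string.  The Python slices format[:ind], format[ind+1:],
-- format[ind+2:] with 0 ≤ ind < len are exactly take ind / drop (ind+1) / drop (ind+2).
def pvLoopA (s : List Char) (ind : Nat) : Option (List Char) :=
  if h : ind < s.length then
    if s[ind] = '^' then some (s.take ind ++ '&' :: s.drop (ind + 1))
    else if ind ≠ s.length - 1 ∧ s[ind] = '[' ∧ s[ind + 1]? = some ']' then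
      some (s.take ind ++ 'B' :: s.drop (ind + 2))
    else if ind ≠ s.length - 1 ∧ s[ind] = '<' ∧ s[ind + 1]? = some '>' then
      some (s.take ind ++ 'D' :: s.drop (ind + 2))
    else pvLoopA s (ind + 1)
  else none
termination_by s.length - ind

-- structural restatement of one scan of A's loop, used below only to justify termination
-- of pvConvA and in the proofs; it is not part of either port's algorithm
def pvScan : List Char → Option (List Char)
  | [] => none
  | c :: r =>
    if c = '^' then some ('&' :: r)
    else if c = '[' ∧ r.head? = some ']' then some ('B' :: r.tail)
    else if c = '<' ∧ r.head? = some '>' then some ('D' :: r.tail)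
    else (pvScan r).map (c :: ·)

def pvMeasure (s : List Char) : Nat := 2 * s.length + s.count '^'

theorem pvLoopA_succ (s : List Char) (c : Char) (ind : Nat) :
    pvLoopA (c :: s) (ind + 1) = (pvLoopA s ind).map (c :: ·) := by
  suffices H : ∀ n ind, s.length - ind ≤ n →
      pvLoopA (c :: s) (ind + 1) = (pvLoopA s ind).map (c :: ·) from H _ ind le_rfl
  intro n
  induction n with
  | zero =>
    intro ind hle
    have h1 : ¬ ind < s.length := by omega
    have h2 : ¬ ind + 1 < (c :: s).length := by simp; omega
    conv_lhs => rw [pvLoopA]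
    conv_rhs => rw [pvLoopA]
    rw [dif_neg h2, dif_neg h1]
    rfl
  | succ n IH =>
    intro ind hle
    by_cases hlt : ind < s.length
    · have hlt' : ind + 1 < (c :: s).length := by simp; omega
      conv_lhs => rw [pvLoopA]
      conv_rhs => rw [pvLoopA]
      rw [dif_pos hlt', dif_pos hlt]
      have g1 : (c :: s)[ind + 1]'hlt' = s[ind]'hlt := by simp
      have g2 : (c :: s)[ind + 1 + 1]? = s[ind + 1]? := by simp
      have g3 : (ind + 1 ≠ (c :: s).length - 1) = (ind ≠ s.length - 1) := by
        simp only [List.length_cons, Nat.add_sub_cancel, eq_iff_iff]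
        omega
      have g4 : (c :: s).take (ind + 1) = c :: s.take ind := List.take_succ_cons
      have g5 : (c :: s).drop (ind + 1 + 1) = s.drop (ind + 1) := List.drop_succ_cons
      have g6 : (c :: s).drop (ind + 1 + 2) = s.drop (ind + 2) := List.drop_succ_cons
      simp only [g1, g2, g3, g4, g5, g6]
      split_ifs with c1 c2 c3
      · rfl
      · rfl
      · rfl
      · exact IH (ind + 1) (by omega)
    · have h2 : ¬ ind + 1 < (c :: s).length := by simp; omega
      conv_lhs => rw [pvLoopA]
      conv_rhs => rw [pvLoopA]
      rw [dif_neg h2, dif_neg hlt]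
      rfl

theorem pvLoopA_zero_eq_scan (s : List Char) : pvLoopA s 0 = pvScan s := by
  induction s with
  | nil => rw [pvLoopA]; simp [pvScan]
  | cons c r ih =>
    conv_lhs => rw [pvLoopA]
    rw [pvScan]
    have hpos : 0 < (c :: r).length := by simp
    rw [dif_pos hpos]
    have g2 : (c :: r)[0 + 1]? = r.head? := by cases r <;> simp
    have g3 : ((0 : Nat) ≠ (c :: r).length - 1) = (r ≠ []) := by
      simp only [List.length_cons, Nat.add_sub_cancel, eq_iff_iff]
      constructor
      · intro h h'; subst h'; simp at h
      · intro h h'; exact h (List.eq_nil_of_length_eq_zero h'.symm)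
    have g5 : (c :: r).drop (0 + 2) = r.tail := by cases r <;> simp
    have hcond : ∀ (ch : Char), ((r ≠ []) ∧ c = ch ∧ r.head? = some ']') = (c = ch ∧ r.head? = some ']') := by
      intro ch
      simp only [eq_iff_iff]
      constructor
      · rintro ⟨_, h⟩; exact h
      · rintro ⟨h1, h2⟩; exact ⟨by rintro rfl; simp at h2, h1, h2⟩
    have hcond2 : ∀ (ch : Char), ((r ≠ []) ∧ c = ch ∧ r.head? = some '>') = (c = ch ∧ r.head? = some '>') := by
      intro ch
      simp only [eq_iff_iff]
      constructor
      · rintro ⟨_, h⟩; exact h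
      · rintro ⟨h1, h2⟩; exact ⟨by rintro rfl; simp at h2, h1, h2⟩
    simp only [List.getElem_cons_zero, g2, g3, g5, List.take_zero, List.drop_succ_cons,
      List.drop_zero, List.nil_append, hcond, hcond2]
    rw [pvLoopA_succ, ih]

theorem pvScan_measure {s t : List Char} (h : pvScan s = some t) :
    pvMeasure t < pvMeasure s := by
  induction s generalizing t with
  | nil => simp [pvScan] at h
  | cons c r ih =>
    rw [pvScan] at h
    split_ifs at h with h1 h2 h3
    · cases h
      subst h1
      have : ('&' :: r).count '^' = r.count '^' := by simp
      simp [pvMeasure, this]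
    · rcases h2 with ⟨hc, hh⟩
      cases h
      cases r with
      | nil => simp at hh
      | cons d r' =>
        simp at hh
        subst hc; subst hh
        simp [pvMeasure]
    · rcases h3 with ⟨hc, hh⟩
      cases h
      cases r with
      | nil => simp at hh
      | cons d r' =>
        simp at hh
        subst hc; subst hh
        simp [pvMeasure]
    · cases ht : pvScan r with
      | none => simp [ht] at h
      | some t' =>
        simp [ht] at h
        subst h
        have := ih ht
        simp [pvMeasure, List.count_cons] at this ⊢
        omega

theorem pvLoopA_measure {s t : List Char} (h : pvLoopA s 0 = some t) :
    pvMeasure t < pvMeasure s := by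
  rw [pvLoopA_zero_eq_scan] at h; exact pvScan_measure h

-- A's outer recursion: rewrite the first token found, then rescan from the start.
def pvConvA (s : List Char) : List Char :=
  match h : pvLoopA s 0 with
  | some t => pvConvA t
  | none => s
termination_by pvMeasure s
decreasing_by exact pvLoopA_measure h

def convert_for_aliases (format : String) : String :=
  String.ofList (pvConvA format.toList)

-- ===== PORT B =====
-- Source B's while loop over i: structural recursion on the character list, one pass,
-- consuming one char (or two for a matched pair) per step, exactly as i advances by 1 or 2.
def pvGo : List Char → List Char
  | [] => []
  | c :: r =>
    if c = '^' then '&' :: pvGo r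
    else if c = '[' ∧ r.head? = some ']' then 'B' :: pvGo r.tail
    else if c = '<' ∧ r.head? = some '>' then 'D' :: pvGo r.tail
    else c :: pvGo r
termination_by s => s.length
decreasing_by all_goals simp [List.length_tail]

def convert_for_aliases_alt (format : String) : String :=
  String.ofList (pvGo format.toList)

-- ===== PRECONDITION & SPEC =====
def Spec_convert_for_aliases (format : String) (out : String) : Prop := out = convert_for_aliases_alt format
instance (format : String) (out : String) : Decidable (Spec_convert_for_aliases format out) := by unfold Spec_convert_for_aliases; infer_instance

-- ===== CLAIM (what is proved, stated in full; the proofs are below) =====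
def Claim_equal_convert_for_aliases : Prop := ∀ (format : String), Dom_convert_for_aliases format → Spec_convert_for_aliases format (convert_for_aliases format)

-- ===== LEMMAS AND PROOFS =====

-- the head of a scan result is either the original head or an inert replacement char
theorem pvScan_head {s t : List Char} (h : pvScan s = some t) :
    t.head? = s.head? ∨ t.head? = some '&' ∨ t.head? = some 'B' ∨ t.head? = some 'D' := by
  cases s with
  | nil => simp [pvScan] at h
  | cons c r =>
    rw [pvScan] at h
    split_ifs at h with h1 h2 h3
    · cases h; simp
    · cases h; simp
    · cases h; simp
    · cases ht : pvScan r with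
      | none => simp [ht] at h
      | some t' => simp [ht] at h; subst h; simp

-- a token-free string is pvGo's fixed point
theorem pvGo_of_scan_none {s : List Char} (h : pvScan s = none) : pvGo s = s := by
  induction s with
  | nil => simp [pvGo]
  | cons c r ih =>
    rw [pvScan] at h
    split_ifs at h with h1 h2 h3
    cases ht : pvScan r with
    | none => rw [pvGo]; simp [h1, h2, h3, ih ht]
    | some t' => simp [ht] at h

-- one rewriting step of A does not change B's answer
theorem pvGo_scan_some {s t : List Char} (h : pvScan s = some t) : pvGo s = pvGo t := by
  induction s generalizing t with
  | nil => simp [pvScan] at h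
  | cons c r ih =>
    rw [pvScan] at h
    split_ifs at h with h1 h2 h3
    · cases h
      subst h1
      rw [pvGo, pvGo]
      simp
    · rcases h2 with ⟨hc, hh⟩
      cases h
      subst hc
      rw [pvGo, pvGo]
      simp [hh]
    · rcases h3 with ⟨hc, hh⟩
      cases h
      subst hc
      rw [pvGo, pvGo]
      simp [hh, h1]
    · cases ht : pvScan r with
      | none => simp [ht] at h
      | some t' =>
        simp [ht] at h
        subst h
        have hhead := pvScan_head ht
        have h2' : ¬ (c = '[' ∧ t'.head? = some ']') := by
          rintro ⟨rfl, hH⟩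
          rcases hhead with hh | hh | hh | hh
          · exact h2 ⟨rfl, by rw [← hh]; exact hH⟩
          · rw [hh] at hH; simp at hH
          · rw [hh] at hH; simp at hH
          · rw [hh] at hH; simp at hH
        have h3' : ¬ (c = '<' ∧ t'.head? = some '>') := by
          rintro ⟨rfl, hH⟩
          rcases hhead with hh | hh | hh | hh
          · exact h3 ⟨rfl, by rw [← hh]; exact hH⟩
          · rw [hh] at hH; simp at hH
          · rw [hh] at hH; simp at hH
          · rw [hh] at hH; simp at hH
        rw [pvGo, pvGo]
        simp [h1, h2, h3, h2', h3', ih ht]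

theorem pvConvA_eq_pvGo (s : List Char) : pvConvA s = pvGo s := by
  induction s using pvConvA.induct with
  | case1 s t h ih =>
    have hs : pvConvA s = pvConvA t := by
      rw [pvConvA]
      split
      · rename_i t' ht'
        rw [ht'] at h; cases h; rfl
      · rename_i ht'
        rw [ht'] at h; cases h
    rw [hs, ih, ← pvGo_scan_some (pvLoopA_zero_eq_scan s ▸ h)]
  | case2 s h =>
    have hs : pvConvA s = s := by
      rw [pvConvA]
      split
      · rename_i t' ht'
        rw [ht'] at h; cases h
      · rfl
    rw [hs, pvGo_of_scan_none (pvLoopA_zero_eq_scan s ▸ h)]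

-- ===== VERDICT (by name: the statement is the Claim_ definition above) =====
theorem convert_for_aliases_spec : Claim_equal_convert_for_aliases := by
  intro format _
  unfold Spec_convert_for_aliases convert_for_aliases convert_for_aliases_alt
  rw [pvConvA_eq_pvGo]
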